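-- pv_equiv track=rewrite | github.com/dengzhengyang98/ecomm_crawler | lambda_function.py | check_forbidden_words
-- ===== SOURCE A (Python) =====
-- def check_forbidden_words(structured_data, forbidden_list):
--     """
--     Checks if any word in the forbidden list exists in the title, bullet_point, or description fields.
--     Returns the first forbidden word found, or None if clean.
--     """
--     fields_to_check = [
--         structured_data.get("title", ""),
--         structured_data.get("bullet_point", ""),
--         structured_data.get("description", "")
--     ]
--
--     # Combine all text and split into words for a case-insensitive check
--     full_text = " ".join(fields_to_check).lower()
--
--     for word in forbidden_list:
--         # Check if the forbidden word exists as a whole word or substring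
--         # Using 'in' is simpler and covers most common scenarios like "assistant's" or "json-like"
--         if word.lower() in full_text:
--             return word
--
--     return None
-- ===== SOURCE B (Python) =====
-- def check_forbidden_words(structured_data, forbidden_list):
--     text = " ".join([
--         structured_data.get("title", ""),
--         structured_data.get("bullet_point", ""),
--         structured_data.get("description", ""),
--     ]).lower()
--     # one pass over the text per DISTINCT word length: collect every window
--     # of those lengths into a set, then answer each word by one set lookup
--     lengths = list(dict.fromkeys(len(w) for w in forbidden_list))
--     windows = set()
--     for L in lengths:
--         for i in range(len(text) - L + 1):
--             windows.add(text[i:i+L])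
--     for word in forbidden_list:
--         if word.lower() in windows:
--             return word
--     return None
-- ===== Notes on version B (the rewrite author's own statement) =====
-- stated objective: alternative
-- what changed: Instead of scanning the whole text once per forbidden word with 'in', B makes one pass over the text per distinct word length, collecting every window of those lengths into a set, then answers each forbidden word with one set lookup.
import Mathlib
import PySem

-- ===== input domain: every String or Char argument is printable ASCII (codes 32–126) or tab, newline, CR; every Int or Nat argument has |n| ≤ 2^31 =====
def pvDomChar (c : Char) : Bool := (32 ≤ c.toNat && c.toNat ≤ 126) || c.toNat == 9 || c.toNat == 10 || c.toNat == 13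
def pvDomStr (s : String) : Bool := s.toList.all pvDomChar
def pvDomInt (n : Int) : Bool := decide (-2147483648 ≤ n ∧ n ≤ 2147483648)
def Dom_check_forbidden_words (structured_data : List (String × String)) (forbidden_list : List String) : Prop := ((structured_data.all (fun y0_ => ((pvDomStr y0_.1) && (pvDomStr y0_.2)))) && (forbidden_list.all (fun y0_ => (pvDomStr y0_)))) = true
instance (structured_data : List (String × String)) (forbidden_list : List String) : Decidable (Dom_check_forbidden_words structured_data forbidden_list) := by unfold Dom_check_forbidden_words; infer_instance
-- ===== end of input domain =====

-- B replaces A's per-word substring scan of the text by one pass that collects every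
-- window of each distinct word length into a set, then one set lookup per word
-- (alternative algorithm, same return value proved).


-- ===== PORT A =====
-- 'for word in forbidden_list: if word.lower() in full_text: return word / return None'
def cfwScanA (full_text : String) : List String → Option String
  | [] => none
  | word :: rest =>
    if PySem.Str.isIn (PySem.Str.lower word) full_text then some word
    else cfwScanA full_text rest

def check_forbidden_words (structured_data : List (String × String)) (forbidden_list : List String) : Option String :=
  let fields_to_check : List String :=
    [PySem.Dict.getD (PySem.Dict.mk structured_data) "title" "",
     PySem.Dict.getD (PySem.Dict.mk structured_data) "bullet_point" "",
     PySem.Dict.getD (PySem.Dict.mk structured_data) "description" ""]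
  let full_text := PySem.Str.lower (PySem.Str.join " " fields_to_check)
  cfwScanA full_text forbidden_list

-- ===== PORT B =====
-- 'for L in lengths: for i in range(len(text) - L + 1): windows.add(text[i:i+L])'
def cfwWindows (text : String) (lengths : List Int) : PySem.Set String :=
  lengths.foldl (fun ws L =>
    (PySem.List.pyRange 0 (PySem.Str.len text - L + 1)).foldl
      (fun ws i => PySem.Set.add ws (PySem.Str.slice text (some i) (some (i + L)))) ws)
    PySem.Set.empty

-- 'for word in forbidden_list: if word.lower() in windows: return word / return None'
def cfwScanB (windows : PySem.Set String) : List String → Option String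
  | [] => none
  | word :: rest =>
    if PySem.Set.contains windows (PySem.Str.lower word) then some word
    else cfwScanB windows rest

def check_forbidden_words_alt (structured_data : List (String × String)) (forbidden_list : List String) : Option String :=
  let text := PySem.Str.lower (PySem.Str.join " "
    [PySem.Dict.getD (PySem.Dict.mk structured_data) "title" "",
     PySem.Dict.getD (PySem.Dict.mk structured_data) "bullet_point" "",
     PySem.Dict.getD (PySem.Dict.mk structured_data) "description" ""])
  let lengths := PySem.List.dedup (forbidden_list.map (fun w => PySem.Str.len w))
  cfwScanB (cfwWindows text lengths) forbidden_list

-- ===== PRECONDITION & SPEC =====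
def Spec_check_forbidden_words (structured_data : List (String × String)) (forbidden_list : List String) (out : Option String) : Prop := out = check_forbidden_words_alt structured_data forbidden_list
instance (structured_data : List (String × String)) (forbidden_list : List String) (out : Option String) : Decidable (Spec_check_forbidden_words structured_data forbidden_list out) := by unfold Spec_check_forbidden_words; infer_instance

-- ===== CLAIM (what is proved, stated in full; the proofs are below) =====
def Claim_equal_check_forbidden_words : Prop := ∀ (structured_data : List (String × String)) (forbidden_list : List String), Dom_check_forbidden_words structured_data forbidden_list → Spec_check_forbidden_words structured_data forbidden_list (check_forbidden_words structured_data forbidden_list)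

-- ===== LEMMAS AND PROOFS =====

-- membership in the window set built by cfwWindows
lemma mem_cfwWindows_aux (text : String) (lengths : List Int) (s : PySem.Set String) (x : String) :
    x ∈ lengths.foldl (fun ws L =>
        (PySem.List.pyRange 0 (PySem.Str.len text - L + 1)).foldl
          (fun ws i => PySem.Set.add ws (PySem.Str.slice text (some i) (some (i + L)))) ws) s ↔
      x ∈ s ∨ ∃ L ∈ lengths, ∃ i : Int, 0 ≤ i ∧ i < PySem.Str.len text - L + 1 ∧
        x = PySem.Str.slice text (some i) (some (i + L)) := by
  induction lengths generalizing s with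
  | nil => simp
  | cons L rest ih =>
    simp only [List.foldl_cons, ih]
    rw [PySem.Set.mem_foldl_add]
    simp only [PySem.List.mem_pyRange_one, List.mem_cons]
    constructor
    · rintro ((hx | ⟨i, ⟨hi0, hi1⟩, rfl⟩) | ⟨L', hL', i, hi0, hi1, rfl⟩)
      · exact Or.inl hx
      · exact Or.inr ⟨L, Or.inl rfl, i, hi0, hi1, rfl⟩
      · exact Or.inr ⟨L', Or.inr hL', i, hi0, hi1, rfl⟩
    · rintro (hx | ⟨L', (rfl | hL'), i, hi0, hi1, rfl⟩)
      · exact Or.inl (Or.inl hx)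
      · exact Or.inl (Or.inr ⟨i, ⟨hi0, hi1⟩, rfl⟩)
      · exact Or.inr ⟨L', hL', i, hi0, hi1, rfl⟩

lemma mem_cfwWindows (text : String) (lengths : List Int) (x : String) :
    x ∈ cfwWindows text lengths ↔
      ∃ L ∈ lengths, ∃ i : Int, 0 ≤ i ∧ i < PySem.Str.len text - L + 1 ∧
        x = PySem.Str.slice text (some i) (some (i + L)) := by
  unfold cfwWindows
  rw [mem_cfwWindows_aux]
  simp [PySem.Set.empty]

-- |w.lower()| = |w|
lemma len_lower (w : String) : PySem.Str.len (PySem.Str.lower w) = PySem.Str.len w := by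
  simp [PySem.Str.len_eq, PySem.Str.toList_lower, PySem.Chars.lower]

-- the crux: 'w.lower() in text' ⟺ 'w.lower() in windows', provided |w| is one of the lengths
lemma isIn_eq_contains (text w : String) (lengths : List Int)
    (hw : PySem.Str.len w ∈ lengths) (hL : ∀ L ∈ lengths, 0 ≤ L) :
    PySem.Str.isIn (PySem.Str.lower w) text
      = PySem.Set.contains (cfwWindows text lengths) (PySem.Str.lower w) := by
  rw [Bool.eq_iff_iff, PySem.Str.isIn_iff_infix, PySem.Set.contains_iff, mem_cfwWindows]
  constructor
  · rintro ⟨a, b, hab⟩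
    refine ⟨PySem.Str.len w, hw, (a.length : Int), by positivity, ?_, ?_⟩
    · have hlen : text.toList.length = a.length + (PySem.Str.lower w).toList.length + b.length := by
        rw [← hab]; simp [PySem.Str.toList_lower]; omega
      have hww : ((PySem.Str.lower w).toList.length : Int) = PySem.Str.len w := by
        rw [← PySem.Str.len_eq, len_lower]
      rw [PySem.Str.len_eq, hlen]
      push_cast [← hww]
      omega
    · have hww : (PySem.Str.len w) = ((PySem.Str.lower w).toList.length : Int) := by
        rw [← PySem.Str.len_eq, len_lower]
      rw [← String.toList_inj, PySem.Str.toList_slice, PySem.Chars.slice_eq_listSlice, hww,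
          PySem.List.slice_natCast_add text.toList a.length, ← hab]
      simp
  · rintro ⟨L, hLmem, i, hi0, _, hx⟩
    have hL0 : 0 ≤ L := hL L hLmem
    have h0iL : 0 ≤ i + L := by omega
    rw [hx, PySem.Str.toList_slice, PySem.Chars.slice_eq_listSlice,
        PySem.List.slice_toNat text.toList hi0 h0iL]
    exact ((List.take_prefix _ _).isInfix).trans ((List.drop_suffix _ _).isInfix)

-- the two scans agree word by word
lemma scan_eq (text : String) (lengths : List Int) (hL : ∀ L ∈ lengths, 0 ≤ L)
    (l : List String) (h : ∀ w ∈ l, PySem.Str.len w ∈ lengths) :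
    cfwScanA text l = cfwScanB (cfwWindows text lengths) l := by
  induction l with
  | nil => rfl
  | cons w rest ih =>
    simp only [cfwScanA, cfwScanB,
      isIn_eq_contains text w lengths (h w (List.mem_cons_self)) hL]
    rw [ih (fun w hw => h w (List.mem_cons_of_mem _ hw))]

-- ===== VERDICT (by name: the statement is the Claim_ definition above) =====
theorem check_forbidden_words_spec : Claim_equal_check_forbidden_words := by
  intro structured_data forbidden_list _
  unfold Spec_check_forbidden_words check_forbidden_words check_forbidden_words_alt
  apply scan_eq
  · intro L hLmem
    rw [PySem.List.mem_dedup] at hLmem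
    obtain ⟨w, _, rfl⟩ := List.mem_map.mp hLmem
    rw [PySem.Str.len_eq]
    positivity
  · intro w hw
    rw [PySem.List.mem_dedup]
    exact List.mem_map.mpr ⟨w, hw, rfl⟩
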